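-- pv_equiv track=rewrite | github.com/artpromedia/aivo | services/evidence-svc/app/processors/keywords.py | _combine_keywords
-- ===== SOURCE A (Python) =====
-- from collections import Counter
--
-- def _combine_keywords(
--
--     keywords_methods: dict[str, list[str]],
--     max_keywords: int,
-- ) -> list[str]:
--     """Combine keywords from different methods."""
--     # Count frequency across methods
--     keyword_counts = Counter()
--
--     for method_keywords in keywords_methods.values():
--         for keyword in method_keywords:
--             keyword_counts[keyword] += 1
--
--     # Sort by frequency and then alphabetically
--     sorted_keywords = sorted(
--         keyword_counts.items(),
--         key=lambda x: (-x[1], x[0]),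
--     )
--
--     # Return top keywords
--     return [keyword for keyword, count in sorted_keywords[:max_keywords]]
-- ===== SOURCE B (Python) =====
-- def _combine_keywords(keywords_methods, max_keywords):
--     """Combine keywords by counting into a dict, bucketing keywords by
--     frequency, and building the ordered list back-to-front per bucket."""
--     counts = {}
--     for method_keywords in keywords_methods.values():
--         for keyword in method_keywords:
--             counts[keyword] = counts.get(keyword, 0) + 1
--     buckets = {}
--     for keyword, count in counts.items():
--         buckets.setdefault(count, []).append(keyword)
--     result = []
--     for count in sorted(buckets):
--         result = sorted(buckets[count]) + result
--     return result[:max_keywords]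
-- ===== Notes on version B (the rewrite author's own statement) =====
-- stated objective: alternative
-- what changed: Replaces A's single sort of (keyword,count) pairs under the tuple key (-count, keyword) by frequency buckets: keywords are grouped by count in a dict, each bucket is sorted alphabetically, and the final ordering is assembled back-to-front while iterating the distinct counts in ascending order.
import Mathlib
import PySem

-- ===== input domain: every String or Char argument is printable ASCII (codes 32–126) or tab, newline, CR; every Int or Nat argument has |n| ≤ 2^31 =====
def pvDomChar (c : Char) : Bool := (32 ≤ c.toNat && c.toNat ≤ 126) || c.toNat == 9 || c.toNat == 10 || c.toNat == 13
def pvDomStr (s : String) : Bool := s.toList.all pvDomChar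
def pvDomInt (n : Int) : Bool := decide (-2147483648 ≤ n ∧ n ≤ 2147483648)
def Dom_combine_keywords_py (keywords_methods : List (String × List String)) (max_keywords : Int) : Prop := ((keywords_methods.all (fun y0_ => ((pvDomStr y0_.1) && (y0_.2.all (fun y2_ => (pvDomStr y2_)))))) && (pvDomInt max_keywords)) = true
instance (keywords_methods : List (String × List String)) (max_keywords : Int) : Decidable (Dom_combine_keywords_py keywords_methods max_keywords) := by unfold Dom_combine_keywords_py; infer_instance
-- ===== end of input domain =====

-- B replaces A's single tuple-keyed sort of (keyword, count) pairs by frequency buckets: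
-- keywords are grouped by count, each bucket is sorted alphabetically, and the ordered list
-- is assembled back-to-front while walking the distinct counts in ascending order (objective:
-- alternative decomposition; same asymptotic cost).

-- ===== PORT A =====
def combine_keywords_py (keywords_methods : List (String × List String)) (max_keywords : Int) : List String :=
  let keyword_counts : PySem.Dict String Int :=
    keywords_methods.foldl
      (fun d p => p.2.foldl (fun d keyword => d.modify keyword 0 (· + 1)) d)
      PySem.Dict.empty
  let sorted_keywords :=
    PySem.List.sorted2 keyword_counts.items (fun x => -x.2) (fun x => x.1)
  (PySem.List.slice sorted_keywords none (some max_keywords)).map (fun p => p.1)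

-- ===== PORT B =====
def combine_keywords_py_alt (keywords_methods : List (String × List String)) (max_keywords : Int) : List String :=
  let counts : PySem.Dict String Int :=
    keywords_methods.foldl
      (fun d p => p.2.foldl (fun d keyword => d.insert keyword (d.getD keyword 0 + 1)) d)
      PySem.Dict.empty
  let buckets : PySem.Dict Int (List String) :=
    counts.items.foldl (fun b p => b.modify p.2 [] (· ++ [p.1])) PySem.Dict.empty
  let result :=
    (PySem.List.sorted buckets.keys (fun c => c)).foldl
      (fun acc c => PySem.List.sorted (buckets.getD c []) (fun k => k) ++ acc) []
  PySem.List.slice result none (some max_keywords)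

-- ===== PRECONDITION & SPEC =====
def Spec_combine_keywords_py (keywords_methods : List (String × List String)) (max_keywords : Int) (out : List String) : Prop := out = combine_keywords_py_alt keywords_methods max_keywords
instance (keywords_methods : List (String × List String)) (max_keywords : Int) (out : List String) : Decidable (Spec_combine_keywords_py keywords_methods max_keywords out) := by unfold Spec_combine_keywords_py; infer_instance

-- ===== CLAIM (what is proved, stated in full; the proofs are below) =====
def Claim_equal_combine_keywords_py : Prop := ∀ (keywords_methods : List (String × List String)) (max_keywords : Int), Dom_combine_keywords_py keywords_methods max_keywords → Spec_combine_keywords_py keywords_methods max_keywords (combine_keywords_py keywords_methods max_keywords)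

-- ===== LEMMAS AND PROOFS =====


theorem pv_sorted2_eq_sorted_lex {α κ₁ κ₂ : Type} [LinearOrder κ₁] [LinearOrder κ₂]
    (xs : List α) (k1 : α → κ₁) (k2 : α → κ₂) :
    PySem.List.sorted2 xs k1 k2 =
      PySem.List.sorted xs (fun x => toLex (k1 x, k2 x)) := by
  rw [PySem.List.sorted_eq_foldl_insertBy]
  show List.foldl _ [] xs = _
  congr 1
  funext acc x
  congr 1
  funext a b
  rcases lt_trichotomy (k1 a) (k1 b) with h | h | h <;> by_cases h2 : k2 a < k2 b
  · simp [Prod.Lex.lt_iff, h, h2, lt_asymm h]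
  · simp [Prod.Lex.lt_iff, h, h2, lt_asymm h]
  · simp [Prod.Lex.lt_iff, h, h2]
  · simp [Prod.Lex.lt_iff, h, h2]
  · simp [Prod.Lex.lt_iff, h, h2, lt_asymm h, ne_of_gt h]
  · simp [Prod.Lex.lt_iff, h, h2, lt_asymm h, ne_of_gt h]

theorem pv_foldl_prepend {α β : Type} (g : α → List β) :
    ∀ (l : List α) (acc : List β),
      l.foldl (fun acc c => g c ++ acc) acc = l.reverse.flatMap g ++ acc := by
  intro l
  induction l with
  | nil => simp
  | cons c t ih => intro acc; simp [List.foldl_cons, ih]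

theorem pv_slice_map {α β : Type} (f : α → β) (l : List α) (b : Int) :
    (PySem.List.slice l none (some b)).map f = PySem.List.slice (l.map f) none (some b) := by
  simp [PySem.List.slice, List.map_take]

-- a fold over a dict's value lists is a fold over the flattened keyword list
theorem pv_counts_eq_counter {ν : Type}
    (km : List (String × List String))
    (f : PySem.Dict String ν → String → PySem.Dict String ν) (init : PySem.Dict String ν) :
    km.foldl (fun d p => p.2.foldl f d) init = (km.flatMap (·.2)).foldl f init :=
  Eq.symm List.foldl_flatMap


theorem pv_partition_perm {α : Type} [DecidableEq α] (key : α → Int) :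
    ∀ (cs : List Int) (l : List α), cs.Nodup → (∀ p ∈ l, key p ∈ cs) →
      (cs.flatMap fun c => l.filter (fun p => key p == c)).Perm l := by
  intro cs
  induction cs with
  | nil =>
      intro l _ hcov
      cases l with
      | nil => simp
      | cons x t => exact absurd (hcov x (by simp)) (by simp)
  | cons c cs' ih =>
      intro l hnd hcov
      rw [List.flatMap_cons]
      have hrest : ∀ c' ∈ cs', l.filter (fun p => key p == c') =
          (l.filter (fun p => !(key p == c))).filter (fun p => key p == c') := by
        intro c' hc'
        rw [List.filter_filter]
        apply List.filter_congr
        intro x _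
        have : c' ≠ c := by rintro rfl; exact (List.nodup_cons.mp hnd).1 hc'
        by_cases h : key x = c' <;> simp [h, this]
      have hflat : (cs'.flatMap fun c' => l.filter (fun p => key p == c')) =
          cs'.flatMap fun c' => (l.filter (fun p => !(key p == c))).filter (fun p => key p == c') := by
        exact List.flatMap_congr hrest
      rw [hflat]
      have hih := ih (l.filter (fun p => !(key p == c))) (List.nodup_cons.mp hnd).2 ?cov
      case cov =>
        intro p hp
        rw [List.mem_filter] at hp
        have := hcov p hp.1
        simp at hp
        simpa [hp.2] using this
      exact (List.Perm.append_left _ hih).trans (List.filter_append_perm _ l)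

theorem pv_flatMap_perm {α β : Type} (f g : α → List β) :
    ∀ (cs : List α), (∀ c ∈ cs, (f c).Perm (g c)) → (cs.flatMap f).Perm (cs.flatMap g) := by
  intro cs
  induction cs with
  | nil => simp
  | cons c t ih =>
      intro h
      rw [List.flatMap_cons, List.flatMap_cons]
      exact (h c (by simp)).append (ih (fun c' hc' => h c' (by simp [hc'])))

theorem pv_main (items : List (String × Int)) (hnd : (items.map (·.1)).Nodup) :
    PySem.List.sorted items (fun x => toLex (-x.2, x.1)) =
      ((PySem.List.sorted (PySem.Set.ofList (items.map (·.2))) (fun c => c)).reverse).flatMap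
        (fun c => (PySem.List.sorted ((items.filter (fun p => p.2 == c)).map (·.1)) (fun k => k)).map
          (fun k => (k, c))) := by
  set C := items.map (·.2) with hC
  set revC := (PySem.List.sorted (PySem.Set.ofList C) (fun c => c)).reverse with hrevC
  set block := fun c => (PySem.List.sorted ((items.filter (fun p => p.2 == c)).map (·.1)) (fun k => k)).map
      (fun k => (k, c)) with hblockdef
  apply PySem.List.sorted_eq_of_perm_of_pairwise_lt
  · -- permutation
    have hblock : ∀ c, (block c).Perm (items.filter (fun p => p.2 == c)) := by
      intro c
      have h1 : (PySem.List.sorted ((items.filter (fun p => p.2 == c)).map (·.1)) (fun k => k)).Perm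
          ((items.filter (fun p => p.2 == c)).map (·.1)) := PySem.List.sorted_perm _ _ _
      have h2 := h1.map (fun k => (k, c))
      have h3 : ((items.filter (fun p => p.2 == c)).map (·.1)).map (fun k => (k, c)) =
          items.filter (fun p => p.2 == c) := by
        rw [List.map_map]
        have : ∀ p ∈ items.filter (fun p => p.2 == c), ((fun k => (k, c)) ∘ (·.1)) p = p := by
          intro p hp
          have := (List.mem_filter.mp hp).2
          simp at this
          simp [Function.comp, ← this]
        rw [List.map_congr_left this, List.map_id']
      rw [h3] at h2
      exact h2
    have hperm1 : (revC.flatMap block).Perm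
        (revC.flatMap fun c => items.filter (fun p => p.2 == c)) :=
      pv_flatMap_perm _ _ _ (fun c _ => hblock c)
    have hndrev : revC.Nodup := by
      rw [hrevC, List.nodup_reverse]
      exact ((PySem.List.sorted_perm _ _ _).nodup_iff).mpr (PySem.Set.nodup_ofList _)
    have hcov : ∀ p ∈ items, p.2 ∈ revC := by
      intro p hp
      rw [hrevC, List.mem_reverse, PySem.List.mem_sorted, PySem.Set.mem_ofList]
      exact List.mem_map_of_mem hp
    exact hperm1.trans (pv_partition_perm (·.2) revC items hndrev hcov)
  · -- pairwise strict
    rw [List.flatMap_def, List.pairwise_flatten]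
    constructor
    · intro l hl
      rw [List.mem_map] at hl
      obtain ⟨c, _, rfl⟩ := hl
      rw [hblockdef]
      simp only [List.pairwise_map]
      have hle := PySem.List.sorted_pairwise ((items.filter (fun p => p.2 == c)).map (·.1)) (fun k => k)
      have hndS : (PySem.List.sorted ((items.filter (fun p => p.2 == c)).map (·.1)) (fun k => k)).Nodup := by
        refine ((PySem.List.sorted_perm _ _ _).nodup_iff).mpr ?_
        exact (List.Sublist.map (·.1) (List.filter_sublist (l := items))).nodup hnd
      exact (hle.and hndS).imp (fun {a b} h => by
        rcases h with ⟨hle', hne⟩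
        rw [Prod.Lex.lt_iff]
        exact Or.inr ⟨rfl, lt_of_le_of_ne hle' hne⟩)
    · rw [List.pairwise_map]
      have hgt : revC.Pairwise (fun a b => b < a) := by
        rw [hrevC, List.pairwise_reverse]
        exact PySem.List.sorted_ofList_pairwise_lt _
      refine hgt.imp (fun {c1 c2} h => ?_)
      intro x hx y hy
      rw [hblockdef] at hx hy
      simp only [List.mem_map] at hx hy
      obtain ⟨k1, _, rfl⟩ := hx
      obtain ⟨k2, _, rfl⟩ := hy
      rw [Prod.Lex.lt_iff]
      left
      simp
      omega

-- ===== VERDICT (by name: the statement is the Claim_ definition above) =====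
theorem combine_keywords_py_spec : Claim_equal_combine_keywords_py := by
  intro keywords_methods max_keywords _dom
  unfold Spec_combine_keywords_py
  unfold combine_keywords_py combine_keywords_py_alt
  set L := keywords_methods.flatMap (·.2) with hL
  have hA : keywords_methods.foldl
      (fun d p => p.2.foldl (fun d keyword => d.modify keyword 0 (· + 1)) d) PySem.Dict.empty
      = PySem.Dict.counter L := by
    rw [pv_counts_eq_counter, ← hL, ← PySem.Dict.counter_eq_foldl]
  have hB : keywords_methods.foldl
      (fun d p => p.2.foldl (fun d keyword => d.insert keyword (d.getD keyword 0 + 1)) d) PySem.Dict.empty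
      = PySem.Dict.counter L := by
    rw [pv_counts_eq_counter, ← hL, PySem.Dict.foldl_insert_getD_add_one_eq_counter]
  simp only [hA, hB]
  set items := (PySem.Dict.counter L).items with hitems
  have hitems' : items = (PySem.Set.ofList L).map (fun k => (k, (L.count k : Int))) :=
    PySem.Dict.items_counter L
  have hfst : items.map (·.1) = PySem.Set.ofList L := by
    rw [hitems']; simp [List.map_map, Function.comp_def]
  have hnd : (items.map (·.1)).Nodup := by rw [hfst]; exact PySem.Set.nodup_ofList L
  -- B side: buckets
  set buckets := items.foldl (fun b p => b.modify p.2 [] (· ++ [p.1])) PySem.Dict.empty with hbk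
  have hkeys : buckets.keys = PySem.Set.ofList (items.map (·.2)) := by
    rw [hbk, PySem.Dict.keys_foldl_modify_key items (·.2) [] (fun b p => (· ++ [p.1]))]
    rfl
  have hswap : buckets = (items.map Prod.swap).foldl (fun b q => b.modify q.1 [] (· ++ [q.2])) PySem.Dict.empty := by
    rw [List.foldl_map]
    rfl
  have hgetD : ∀ c, buckets.getD c [] = (items.filter (fun p => p.2 == c)).map (·.1) := by
    intro c
    rw [hswap, PySem.Dict.getD_foldl_modify_append]
    simp [List.filter_map, Function.comp_def, Prod.swap]
  simp only [hkeys, hgetD]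
  rw [pv_foldl_prepend, List.append_nil]
  -- A side
  rw [pv_sorted2_eq_sorted_lex, pv_main items hnd, pv_slice_map]
  congr 1
  rw [List.map_flatMap]
  congr 1
  funext c
  rw [List.map_map]
  simp [Function.comp_def]
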